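-- pv_equiv track=rewrite | github.com/birnbaumlab/TCRAFT | TCRAFT/generate_cdr3_oligos.py | check_homopolymer_sites
-- ===== SOURCE A (Python) =====
-- def rev_comp(seq):
--     """
--     Returns the reverse complement of a DNA sequence 'seq'.
--     """
--     mapper = {'A':'T', 'T':'A', 'G':'C', 'C':'G'}
--     return ''.join([mapper[nt] for nt in seq[::-1]])
--
-- def check_homopolymer_sites(seq):
--     """
--     Checks if homopolymers >= 5bp in length are present in the sequence.
--     params
--         seq: The sequence to check.
--
--     return
--         A tuple containing the position of the first found homopolymer site and the site itself.
--         If no sites are found, returns (-1, None).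
--     """
--     for site in ['AAAAA', 'CCCCC', 'GGGGG', 'TTTTT']:
--         if site in seq:
--             try:
--                 pos = seq.index(site)
--             except ValueError:
--                 pos = seq.index(rev_comp(site))
--             return pos, site
--     return -1, None
-- ===== SOURCE B (Python) =====
-- def check_homopolymer_sites(seq):
--     """Single linear pass tracking the current homopolymer run; record in a dict
--     the start index of the first run reaching 5 for each base, then pick the
--     winner by the fixed base priority A, C, G, T."""
--     found = {}
--     prev = None
--     run = 0
--     for i, ch in enumerate(seq):
--         if ch == prev:
--             run += 1
--         else:
--             prev = ch
--             run = 1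
--         if run == 5 and ch not in found:
--             found[ch] = i - 4
--     for b in 'ACGT':
--         if b in found:
--             return found[b], b * 5
--     return -1, None
-- ===== Notes on version B (the rewrite author's own statement) =====
-- stated objective: alternative
-- what changed: A scans the string up to four times (one substring containment test plus one index search per homopolymer site); B makes a single linear pass tracking the current base and run length, records in a dict the start of the first run reaching 5 per base, and then picks the winner in the fixed priority order A, C, G, T.
import Mathlib
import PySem

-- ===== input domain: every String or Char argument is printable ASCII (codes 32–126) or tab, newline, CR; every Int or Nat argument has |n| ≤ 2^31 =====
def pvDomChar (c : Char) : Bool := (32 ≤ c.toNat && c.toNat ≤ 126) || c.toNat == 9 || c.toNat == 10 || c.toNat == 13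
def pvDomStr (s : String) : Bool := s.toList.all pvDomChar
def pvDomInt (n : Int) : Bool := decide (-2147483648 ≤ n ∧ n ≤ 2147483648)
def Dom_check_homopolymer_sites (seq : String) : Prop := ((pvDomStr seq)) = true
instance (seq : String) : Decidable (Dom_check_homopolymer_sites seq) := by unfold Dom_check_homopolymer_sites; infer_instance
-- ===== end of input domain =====

-- B replaces A's four substring scans (one 'in' + one '.index' per site) by one
-- linear pass tracking the current homopolymer run, then selects by base priority.

-- ===== PORT A =====
-- A's loop over the four site strings with early return.
-- Python's 'seq.index(site)' under the guard 'site in seq' always succeeds and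
-- equals 'seq.find(site)'; the 'except ValueError' branch (and the rev_comp
-- helper it would call) is unreachable, so it is ported as the find value.
def pvALoop (seq : String) : List String → Int × Option String
  | [] => (-1, none)
  | site :: rest =>
    if PySem.Str.isIn site seq then
      (PySem.Str.find seq site, some site)
    else pvALoop seq rest

def check_homopolymer_sites (seq : String) : Int × Option String :=
  pvALoop seq ["AAAAA", "CCCCC", "GGGGG", "TTTTT"]

-- ===== PORT B =====
-- state: (prev, run, found) as in Source B
def pvStep (st : Option Char × Int × PySem.Dict Char Int) (p : Int × Char) :
    Option Char × Int × PySem.Dict Char Int :=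
  let prev := st.1
  let run := st.2.1
  let found := st.2.2
  let prev2 := if prev = some p.2 then prev else some p.2
  let run2 := if prev = some p.2 then run + 1 else 1
  let found2 := if run2 = 5 ∧ found.contains p.2 = false then found.insert p.2 (p.1 - 4) else found
  (prev2, run2, found2)

-- 'for b in "ACGT": if b in found: return found[b], b*5'
def pvBSel (found : PySem.Dict Char Int) : List Char → Int × Option String
  | [] => (-1, none)
  | b :: rest =>
    match found.get? b with
    | some p => (p, some (String.ofList (List.replicate 5 b)))
    | none => pvBSel found rest

def check_homopolymer_sites_alt (seq : String) : Int × Option String :=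
  let st := (PySem.List.enumerate seq.toList 0).foldl pvStep (none, 0, PySem.Dict.empty)
  pvBSel st.2.2 ['A', 'C', 'G', 'T']

-- ===== PRECONDITION & SPEC =====
def Spec_check_homopolymer_sites (seq : String) (out : Int × Option String) : Prop := out = check_homopolymer_sites_alt seq
instance (seq : String) (out : Int × Option String) : Decidable (Spec_check_homopolymer_sites seq out) := by unfold Spec_check_homopolymer_sites; infer_instance

-- ===== CLAIM (what is proved, stated in full; the proofs are below) =====
def Claim_equal_check_homopolymer_sites : Prop := ∀ (seq : String), Dom_check_homopolymer_sites seq → Spec_check_homopolymer_sites seq (check_homopolymer_sites seq)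

-- ===== LEMMAS AND PROOFS =====

def pvF (c : Char) : List Char → Option Nat
  | [] => none
  | x :: t => if (x :: t).take 5 = List.replicate 5 c then some 0 else (pvF c t).map (· + 1)

lemma pvF_cons (c x : Char) (t : List Char) :
    pvF c (x :: t) = if (x :: t).take 5 = List.replicate 5 c then some 0
      else (pvF c t).map (· + 1) := rfl

lemma pvF_none_of_short (c : Char) (l : List Char) (h : l.length < 5) : pvF c l = none := by
  induction l with
  | nil => rfl
  | cons x t ih =>
    have hne : (x :: t).take 5 ≠ List.replicate 5 c := by
      intro he
      have := congrArg List.length he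
      rw [List.length_take, List.length_replicate] at this
      simp only [List.length_cons] at this h
      omega
    rw [pvF_cons, if_neg hne, ih (by simp at h ⊢; omega)]
    rfl

lemma pvF_none_iff (c : Char) (l : List Char) :
    pvF c l = none ↔ ∀ j, ¬ (List.replicate 5 c <+: l.drop j) := by
  induction l with
  | nil =>
    constructor
    · intro _ j hp
      have := hp.length_le
      simp at this
    · intro _; rfl
  | cons x t ih =>
    by_cases h0 : (x :: t).take 5 = List.replicate 5 c
    · rw [pvF_cons, if_pos h0]
      constructor
      · intro h; exact absurd h (by simp)
      · intro h
        exact absurd (by rw [List.drop_zero, List.prefix_iff_eq_take, List.length_replicate, h0]) (h 0)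
    · rw [pvF_cons, if_neg h0, Option.map_eq_none_iff, ih]
      constructor
      · intro h j hp
        cases j with
        | zero =>
          rw [List.drop_zero, List.prefix_iff_eq_take, List.length_replicate] at hp
          exact h0 hp.symm
        | succ j => exact h j (by simpa using hp)
      · intro h j hp
        exact h (j + 1) (by simpa using hp)

lemma pvF_some_spec (c : Char) (l : List Char) :
    ∀ k, pvF c l = some k →
      List.replicate 5 c <+: l.drop k ∧ ∀ j < k, ¬ (List.replicate 5 c <+: l.drop j) := by
  induction l with
  | nil => intro k h; exact absurd h (by simp [pvF])
  | cons x t ih =>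
    intro k h
    by_cases h0 : (x :: t).take 5 = List.replicate 5 c
    · rw [pvF_cons, if_pos h0, Option.some.injEq] at h
      subst h
      refine ⟨by rw [List.drop_zero, List.prefix_iff_eq_take, List.length_replicate, h0], ?_⟩
      intro j hj; omega
    · rw [pvF_cons, if_neg h0, Option.map_eq_some_iff] at h
      obtain ⟨k', hk', rfl⟩ := h
      obtain ⟨h1, h2⟩ := ih k' hk'
      refine ⟨by simpa using h1, ?_⟩
      intro j hj
      cases j with
      | zero =>
        rw [List.drop_zero, List.prefix_iff_eq_take, List.length_replicate]
        exact fun he => h0 he.symm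
      | succ j =>
        intro hp
        exact h2 j (by omega) (by simpa using hp)

lemma pvFind_eq (c : Char) (l : List Char) :
    PySem.Chars.find l (List.replicate 5 c) =
      (match pvF c l with | some k => (k : Int) | none => -1) := by
  cases hF : pvF c l with
  | none =>
    rw [PySem.Chars.find_eq_neg_one_iff]
    intro hinf
    have : ∃ j, List.replicate 5 c <+: l.drop j := by
      rw [PySem.Chars.exists_prefix_drop_iff_isIn, PySem.Chars.isIn_iff_infix]
      exact hinf
    obtain ⟨j, hj⟩ := this
    exact (pvF_none_iff c l).mp hF j hj
  | some k =>
    obtain ⟨h1, h2⟩ := pvF_some_spec c l k hF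
    have hinf : List.replicate 5 c <:+: l := by
      rw [← PySem.Chars.isIn_iff_infix, ← PySem.Chars.exists_prefix_drop_iff_isIn]
      exact ⟨k, h1⟩
    have hnn : 0 ≤ PySem.Chars.find l (List.replicate 5 c) := by
      rw [PySem.Chars.find_nonneg_iff]; exact hinf
    obtain ⟨hp, hmin⟩ := PySem.Chars.find_spec (s := l) (sub := List.replicate 5 c) hnn
    have heq : (PySem.Chars.find l (List.replicate 5 c)).toNat = k := by
      rcases Nat.lt_trichotomy (PySem.Chars.find l (List.replicate 5 c)).toNat k with h | h | h
      · exact absurd hp (h2 _ h)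
      · exact h
      · exact absurd h1 (hmin k h)
    show PySem.Chars.find l (List.replicate 5 c) = (k : Int)
    omega

lemma pvIsIn_eq (c : Char) (l : List Char) :
    PySem.Chars.isIn (List.replicate 5 c) l = (pvF c l).isSome := by
  cases hF : pvF c l with
  | none =>
    rw [(PySem.Chars.isIn_eq_false_iff _ _).mpr ?_, Option.isSome_none]
    intro hinf
    have : ∃ j, List.replicate 5 c <+: l.drop j := by
      rw [PySem.Chars.exists_prefix_drop_iff_isIn, PySem.Chars.isIn_iff_infix]; exact hinf
    obtain ⟨j, hj⟩ := this
    exact (pvF_none_iff c l).mp hF j hj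
  | some k =>
    obtain ⟨h1, _⟩ := pvF_some_spec c l k hF
    rw [(PySem.Chars.exists_prefix_drop_iff_isIn _ _).mp ⟨k, h1⟩]
    rfl
def pvRun (c : Char) : Nat → List Char → Int → Option Int
  | _, [], _ => none
  | r, x :: t, i =>
    if x = c then (if r + 1 = 5 then some (i - 4) else pvRun c (r + 1) t (i + 1))
    else pvRun c 0 t (i + 1)

lemma pvF_head (c : Char) (l : List Char)
    (h : l.take 5 = List.replicate 5 c) : pvF c l = some 0 := by
  cases l with
  | nil => exact absurd (by rw [List.take_nil] at h; exact h) (by simp)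
  | cons x t => rw [pvF_cons, if_pos h]

lemma pvRun_cons (c x : Char) (r : Nat) (t : List Char) (i : Int) :
    pvRun c r (x :: t) i =
      if x = c then (if r + 1 = 5 then some (i - 4) else pvRun c (r + 1) t (i + 1))
      else pvRun c 0 t (i + 1) := rfl

lemma pvTake5_ne (c x : Char) (l : List Char) (hx : x ≠ c) (hm : x ∈ l.take 5) :
    l.take 5 ≠ List.replicate 5 c := by
  intro he
  rw [he] at hm
  exact hx (List.eq_of_mem_replicate hm)

lemma pvF_skip (c x : Char) (hx : x ≠ c) (t : List Char) :
    ∀ r, r ≤ 4 → pvF c (List.replicate r c ++ x :: t) = (pvF c t).map (· + (r + 1)) := by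
  intro r
  induction r with
  | zero =>
    intro _
    have h0 : (x :: t).take 5 ≠ List.replicate 5 c :=
      pvTake5_ne c x (x :: t) hx (by
        rw [List.take_cons (by omega)]; exact List.mem_cons_self)
    simp only [List.replicate_zero, List.nil_append]
    rw [pvF_cons, if_neg h0]
  | succ r ih =>
    intro hr
    rw [List.replicate_succ, List.cons_append]
    have hmem : x ∈ (c :: (List.replicate r c ++ x :: t)).take 5 := by
      rw [List.take_cons (by omega)]
      refine List.mem_cons_of_mem _ ?_
      rw [List.take_append]
      simp
      right
      rw [List.take_cons (by omega)]
      exact List.mem_cons_self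
    rw [pvF_cons, if_neg (pvTake5_ne c x _ hx hmem), ih (by omega)]
    rw [Option.map_map]
    congr 1

lemma pvRun_eq_pvF (c : Char) (cs : List Char) :
    ∀ (r : Nat) (i : Int), r ≤ 4 →
      pvRun c r cs i = (pvF c (List.replicate r c ++ cs)).map (fun k => i - r + k) := by
  induction cs with
  | nil =>
    intro r i hr
    rw [pvF_none_of_short c _ (by simp; omega)]
    rfl
  | cons x t ih =>
    intro r i hr
    by_cases hx : x = c
    · by_cases h5 : r + 1 = 5
      · have hr4 : r = 4 := by omega
        subst hr4
        have htake : (List.replicate 4 c ++ x :: t).take 5 = List.replicate 5 c := by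
          rw [hx, List.take_append]
          simp
        rw [pvRun_cons, if_pos hx, if_pos h5, pvF_head _ _ htake]
        simp
      · have hlist : List.replicate r c ++ x :: t = List.replicate (r + 1) c ++ t := by
          rw [List.replicate_succ']
          simp [hx]
        rw [pvRun_cons, if_pos hx, if_neg h5, ih (r + 1) (i + 1) (by omega), hlist]
        cases pvF c (List.replicate (r + 1) c ++ t) with
        | none => rfl
        | some k => simp
    · rw [pvRun_cons, if_neg hx, ih 0 (i + 1) (by omega), pvF_skip c x hx t r hr]
      simp only [List.replicate_zero, List.nil_append]
      cases pvF c t with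
      | none => rfl
      | some k =>
        simp
        ring
lemma pvStep_eq (prev : Option Char) (run : Int) (found : PySem.Dict Char Int)
    (i : Int) (x : Char) :
    pvStep (prev, run, found) (i, x) =
      (if prev = some x then prev else some x,
       if prev = some x then run + 1 else 1,
       if (if prev = some x then run + 1 else 1) = 5 ∧ found.contains x = false
         then found.insert x (i - 4) else found) := rfl

lemma pvScan_inv (c : Char) (cs : List Char) :
    ∀ (i : Int) (prev : Option Char) (run : Int) (found : PySem.Dict Char Int),
      (found.contains c = false → prev = some c → 1 ≤ run ∧ run ≤ 4) →
      ((PySem.List.enumerate cs i).foldl pvStep (prev, run, found)).2.2.get? c =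
        (if found.contains c = true then found.get? c
         else pvRun c (if prev = some c then run.toNat else 0) cs i) := by
  induction cs with
  | nil =>
    intro i prev run found _
    rw [PySem.List.enumerate_nil, List.foldl_nil]
    by_cases hc : found.contains c = true
    · rw [if_pos hc]
    · rw [if_neg hc]
      show found.get? c = none
      exact (PySem.Dict.get?_eq_none_iff_contains found c).mpr (by
        cases hcc : found.contains c
        · rfl
        · exact absurd hcc hc)
  | cons x t ih =>
    intro i prev run found h
    rw [PySem.List.enumerate_cons, List.foldl_cons, pvStep_eq]
    by_cases hp : prev = some x
    · rw [hp]
      simp only [if_true]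
      by_cases h5 : run + 1 = 5 ∧ found.contains x = false
      · rw [if_pos h5]
        rw [ih (i + 1) (some x) (run + 1) (found.insert x (i - 4)) (by
          intro hc2 hpc
          injection hpc with he
          subst he
          rw [PySem.Dict.contains_insert] at hc2
          simp at hc2)]
        by_cases hxc : x = c
        · subst hxc
          rw [hp] at h
          obtain ⟨hr1, hr4⟩ := h h5.2 rfl
          rw [if_pos (show (found.insert x (i - 4)).contains x = true by
                rw [PySem.Dict.contains_insert]; simp),
              PySem.Dict.get?_insert_self,
              if_neg (show ¬ found.contains x = true by rw [h5.2]; simp),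
              pvRun_cons]
          simp only [if_true]
          rw [if_pos (show run.toNat + 1 = 5 by omega)]
        · have hcx : c ≠ x := fun he => hxc he.symm
          by_cases hc : found.contains c = true
          · rw [if_pos (show (found.insert x (i - 4)).contains c = true by
                  rw [PySem.Dict.contains_insert]; simp [hc]),
                PySem.Dict.get?_insert_of_ne _ _ hcx, if_pos hc]
          · have hcf : found.contains c = false := by
              cases hcc : found.contains c
              · rfl
              · exact absurd hcc hc
            rw [if_neg (show ¬ (found.insert x (i - 4)).contains c = true by
                  rw [PySem.Dict.contains_insert, hcf]; simp; exact hcx),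
                if_neg hc, pvRun_cons, if_neg hxc,
                if_neg (show ¬ (some x : Option Char) = some c by simp [hxc])]
      · rw [if_neg h5]
        rw [ih (i + 1) (some x) (run + 1) found (by
          intro hc2 hpc
          injection hpc with he
          subst he
          rw [hp] at h
          obtain ⟨hr1, hr4⟩ := h hc2 rfl
          have h51 : ¬ run + 1 = 5 := fun hh => h5 ⟨hh, hc2⟩
          omega)]
        by_cases hc : found.contains c = true
        · rw [if_pos hc, if_pos hc]
        · have hcf : found.contains c = false := by
            cases hcc : found.contains c
            · rfl
            · exact absurd hcc hc
          rw [if_neg hc, if_neg hc]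
          by_cases hxc : x = c
          · subst hxc
            rw [hp] at h
            obtain ⟨hr1, hr4⟩ := h hcf rfl
            have h51 : ¬ run + 1 = 5 := fun hh => h5 ⟨hh, hcf⟩
            rw [pvRun_cons]
            simp only [if_true]
            rw [if_neg (show ¬ run.toNat + 1 = 5 by omega),
                show (run + 1).toNat = run.toNat + 1 by omega]
          · rw [pvRun_cons, if_neg hxc,
                if_neg (show ¬ (some x : Option Char) = some c by simp [hxc])]
    · simp only [if_neg hp]
      rw [if_neg (show ¬ ((1 : Int) = 5 ∧ found.contains x = false) from
            fun hh => by norm_num at hh)]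
      rw [ih (i + 1) (some x) 1 found (by
        intro _ _
        constructor <;> norm_num)]
      by_cases hc : found.contains c = true
      · rw [if_pos hc, if_pos hc]
      · rw [if_neg hc, if_neg hc, pvRun_cons]
        by_cases hxc : x = c
        · subst hxc
          simp only [if_true]
          rw [if_neg hp, if_neg (show ¬ (0 : Nat) + 1 = 5 by norm_num)]
          norm_num
        · rw [if_neg hxc,
              if_neg (show ¬ (some x : Option Char) = some c by simp [hxc])]

lemma pvDict_get (c : Char) (cs : List Char) :
    ((PySem.List.enumerate cs 0).foldl pvStep (none, 0, PySem.Dict.empty)).2.2.get? c =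
      (pvF c cs).map (fun k => (k : Int)) := by
  rw [pvScan_inv c cs 0 none 0 PySem.Dict.empty (by intro _ h; exact absurd h (by simp))]
  rw [if_neg (by rw [PySem.Dict.contains_empty]; simp),
      if_neg (by simp)]
  rw [pvRun_eq_pvF c cs 0 0 (by omega)]
  simp
-- ===== VERDICT (by name: the statement is the Claim_ definition above) =====
theorem check_homopolymer_sites_spec : Claim_equal_check_homopolymer_sites := by
  intro seq _
  show check_homopolymer_sites seq = check_homopolymer_sites_alt seq

  have hbIn : ∀ (c : Char) (site : String), site.toList = List.replicate 5 c →
      PySem.Str.isIn site seq = (pvF c seq.toList).isSome := by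
    intro c site hs
    rw [PySem.Str.isIn_eq, hs, pvIsIn_eq]
  have hbFind : ∀ (c : Char) (site : String), site.toList = List.replicate 5 c →
      PySem.Str.find seq site =
        (match pvF c seq.toList with | some k => (k : Int) | none => -1) := by
    intro c site hs
    rw [PySem.Str.find_eq, hs, pvFind_eq]
  simp only [check_homopolymer_sites, check_homopolymer_sites_alt, pvALoop, pvBSel]
  rw [pvDict_get 'A', pvDict_get 'C', pvDict_get 'G', pvDict_get 'T',
      hbIn 'A' _ (by decide), hbIn 'C' _ (by decide), hbIn 'G' _ (by decide),
      hbIn 'T' _ (by decide),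
      hbFind 'A' _ (by decide), hbFind 'C' _ (by decide), hbFind 'G' _ (by decide),
      hbFind 'T' _ (by decide)]
  cases hA : pvF 'A' seq.toList <;> cases hC : pvF 'C' seq.toList <;>
    cases hG : pvF 'G' seq.toList <;> cases hT : pvF 'T' seq.toList <;>
      simp
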